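/-
  THE CONTRACTS OF THE TOY PROGRAM (c/toy/toy.c), over the shadow layer only. Ghost parameters of every Spec: `others`, `frames` —
  the live objects of the shadow invariant. The names are those of the base-image platform (ProgX/Base/Spec/Basic.lean):
  `ShadowPre` = `ProgX.Base.ShadowPre`, `LiveIn` = `ProgX.Base.LiveIn`.

      function       own frame                          callees (largest frame)                     frame
      clamp_length   —                                  —                                               0
      weighted_sum   5 pushes = 40                      __asan_load1_noabort (16)           40 + 8 + 16 =  64
      store_sum      5 pushes = 40                      __asan_store1_noabort (16)          40 + 8 + 16 =  64
      fill_buffer    2 pushes + sub rsp 8 = 24          memcpy (80), memset (64)            24 + 8 + 80 = 112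
      prog_main      4 pushes + sub rsp 88H = 168       fill_buffer (112)                 168 + 8 + 112 = 288   PROTECTED (the buffer)
      (c/toy/toy_STACK.txt has the same numbers)
-/
import ProgX.Base.Spec.Libc
import Toy.Spec.Runtime
import Toy.Frames
import Toy.Code
import Toy.Dec.All
namespace Toy.Spec
open X86 X86.User Asan ProgX.Base

/-- **`clamp_length(rdi = len)`**: `min(len, 64)`, and 0 for a negative `len`. A leaf without a frame: no memory access but the
`ret`'s. What the caller needs: the result is at most 64, and at most `len` when `len` is not negative (as a signed number:
below 2^63), so that `len` readable input bytes are enough for a copy of `result` bytes. -/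
def clamp_length.spec (others : List Obj) (frames : List (Nat × FrameLayout)) : Spec where
  pre u :=
    ShadowPre others frames u
  post u v :=
    (v.reg .rax).toNat ≤ 64 ∧
    ((u.reg .rdi).toNat < 2 ^ 63 → (v.reg .rax).toNat ≤ (u.reg .rdi).toNat) ∧
    ShadowUntouched u.mem v.mem
  frame := 0
  writes _ := []

@[vspec] theorem clamp_length.spec_frame (others : List Obj) (frames : List (Nat × FrameLayout)) :
    (clamp_length.spec others frames).frame = 0 := id rfl

@[vspec] theorem clamp_length.spec_writes (others : List Obj) (frames : List (Nat × FrameLayout)) (u : State) :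
    (clamp_length.spec others frames).writes u = [] := id rfl

/-- **`weighted_sum(rdi = buffer)`**: the 64 bytes at `buffer` lie inside one live object; the global `weights` is a live object
(its four bytes are read through a check: `weights[i & 3]`). Returns the sum (any value to the proof). Nothing is written but
its own 64 bytes of stack; no shadow byte is written. -/
def weighted_sum.spec (others : List Obj) (frames : List (Nat × FrameLayout)) : Spec where
  pre u :=
    ShadowPre others frames u ∧
    LiveIn others frames (u.reg .rdi).toNat 64 ∧
    Toy.Globals.weights.obj ∈ others
  post u v :=
    ShadowUntouched u.mem v.mem
  frame := 64
  writes _ := []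

@[vspec] theorem weighted_sum.spec_frame (others : List Obj) (frames : List (Nat × FrameLayout)) :
    (weighted_sum.spec others frames).frame = 64 := id rfl

@[vspec] theorem weighted_sum.spec_writes (others : List Obj) (frames : List (Nat × FrameLayout)) (u : State) :
    (weighted_sum.spec others frames).writes u = [] := id rfl

/-- **`store_sum(rdi = out, rsi = sum)`**: the 8 bytes at `out` lie inside one live object. Writes them (the sum, little endian:
not stated) and its own 64 bytes of stack; no shadow byte is written. -/
def store_sum.spec (others : List Obj) (frames : List (Nat × FrameLayout)) : Spec where
  pre u :=
    ShadowPre others frames u ∧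
    LiveIn others frames (u.reg .rdi).toNat 8
  post u v :=
    ShadowUntouched u.mem v.mem
  frame := 64
  writes u := [⟨(u.reg .rdi).toNat, (u.reg .rdi).toNat + 8⟩]

@[vspec] theorem store_sum.spec_frame (others : List Obj) (frames : List (Nat × FrameLayout)) :
    (store_sum.spec others frames).frame = 64 := id rfl

@[vspec] theorem store_sum.spec_writes (others : List Obj) (frames : List (Nat × FrameLayout)) (u : State) :
    (store_sum.spec others frames).writes u = [⟨(u.reg .rdi).toNat, (u.reg .rdi).toNat + 8⟩] := id rfl

/-- **`fill_buffer(rdi = buffer, rsi = in, rdx = n)`**: `n ≤ 64`; the 64 bytes at `buffer` lie inside one live object; `n = 0`, or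
the `n` bytes at `in` lie inside one live object and the copy's overlap, if any, is harmless (`buffer ≤ in`, or the ranges do not
meet: what `memcpy` asks). `memcpy(buffer, in, n)`, then `memset(buffer + n, fill_byte, 64 - n)` (the global `fill_byte` is read
without a check: gcc knows the access is in bounds). Writes the buffer and its own 112 bytes of stack; no shadow byte is written. -/
def fill_buffer.spec (others : List Obj) (frames : List (Nat × FrameLayout)) : Spec where
  pre u :=
    ShadowPre others frames u ∧
    (u.reg .rdx).toNat ≤ 64 ∧
    LiveIn others frames (u.reg .rdi).toNat 64 ∧
    ((u.reg .rdx).toNat = 0 ∨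
      (LiveIn others frames (u.reg .rsi).toNat (u.reg .rdx).toNat ∧
       ((u.reg .rdi).toNat ≤ (u.reg .rsi).toNat ∨ (u.reg .rsi).toNat + (u.reg .rdx).toNat ≤ (u.reg .rdi).toNat)))
  post u v :=
    ShadowUntouched u.mem v.mem
  frame := 112
  writes u := [⟨(u.reg .rdi).toNat, (u.reg .rdi).toNat + 64⟩]

@[vspec] theorem fill_buffer.spec_frame (others : List Obj) (frames : List (Nat × FrameLayout)) :
    (fill_buffer.spec others frames).frame = 112 := id rfl

@[vspec] theorem fill_buffer.spec_writes (others : List Obj) (frames : List (Nat × FrameLayout)) (u : State) :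
    (fill_buffer.spec others frames).writes u = [⟨(u.reg .rdi).toNat, (u.reg .rdi).toNat + 64⟩] := id rfl

/-- The shadow bytes: what a protected function writes besides its declared windows (its prologue poisons, its epilogue cleans). -/
def shadowAll : Span := ⟨0xC00000, 0xE00000⟩

/-- The global `calls`, which `prog_main` increments (an unchecked access: gcc knows it is in bounds). -/
def callsSpan : Span := ⟨Toy.Globals.calls.beg, Toy.Globals.calls.beg + 8⟩

/-- **`prog_main(rdi = in, rsi = len, rdx = out, rcx = cap, r8 = heap, r9 = heap_len)`** (PROTECTED frame `Toy.Frames.prog_main`: the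
64-byte buffer): `len` is at most 1FF000H and the `len` bytes at `in` lie inside one live object (or `len = 0`), off the stack
region (the copy into the buffer must not overlap harmfully: the input is not on the stack); the 8 bytes at `out` lie inside one
live object; the global `weights` is a live object. Whatever `cap` is: `cap < 8` returns 0 at once (through the epilogue).
Afterwards the shadow layer is as at entry (the epilogue cleaned what the prologue poisoned). Writes `out[0..8)`, the global
`calls`, shadow bytes and 288 bytes of stack. -/
def prog_main.spec (others : List Obj) (frames : List (Nat × FrameLayout)) : Spec where
  pre u :=
    ShadowPre others frames u ∧
    (u.reg .rsi).toNat ≤ 0x1FF000 ∧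
    ((u.reg .rsi).toNat = 0 ∨
      (LiveIn others frames (u.reg .rdi).toNat (u.reg .rsi).toNat ∧
       ((u.reg .rdi).toNat + (u.reg .rsi).toNat ≤ 0x700000 ∨ 0x800000 ≤ (u.reg .rdi).toNat))) ∧
    LiveIn others frames (u.reg .rdx).toNat 8 ∧
    ((u.reg .rdx).toNat + 8 ≤ 0x700000 ∨ 0x800000 ≤ (u.reg .rdx).toNat) ∧
    Toy.Globals.weights.obj ∈ others
  post _ v :=
    ShadowInv others frames (v.reg .rsp).toNat v.mem
  frame := 288
  writes u := [⟨(u.reg .rdx).toNat, (u.reg .rdx).toNat + 8⟩, callsSpan, shadowAll]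

@[vspec] theorem prog_main.spec_frame (others : List Obj) (frames : List (Nat × FrameLayout)) :
    (prog_main.spec others frames).frame = 288 := id rfl

@[vspec] theorem prog_main.spec_writes (others : List Obj) (frames : List (Nat × FrameLayout)) (u : State) :
    (prog_main.spec others frames).writes u =
      [⟨(u.reg .rdx).toNat, (u.reg .rdx).toNat + 8⟩, ⟨0x141c00, 0x141c08⟩, ⟨0xC00000, 0xE00000⟩] := id rfl

end Toy.Spec
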